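-- pv_equiv track=rewrite | github.com/ARUNJOGLE/Research_Assistant_Crew_AI | research_assistant_for_phd_scholars/src/research_assistant_for_phd_scholars/app.py | format_report_as_results
-- ===== SOURCE A (Python) =====
-- def format_report_as_results(report_content):
--     # Split the report into sections
--     sections = report_content.split('\n\n')
--
--     results = []
--     current_section = {'title': '', 'description': '', 'url': ''}
--
--     for section in sections:
--         if section.strip():
--             # Check if it's a header
--             if section.startswith('#'):
--                 # If we have a previous section, add it to results
--                 if current_section['title']:
--                     results.append(current_section.copy())
--                 current_section['title'] = section.lstrip('#').strip()
--                 current_section['description'] = ''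
--             else:
--                 # Append to current section description
--                 if current_section['description']:
--                     current_section['description'] += '\n\n'
--                 current_section['description'] += section.strip()
--
--     # Add the last section
--     if current_section['title']:
--         results.append(current_section)
--
--     # If no sections were found, create a single result
--     if not results:
--         results.append({
--             'title': 'Search Results',
--             'description': report_content,
--             'url': ''
--         })
--
--     return results
-- ===== SOURCE B (Python) =====
-- def format_report_as_results(report_content):
--     # Block-boundary scan: pre-filter the non-blank sections, skip anything before
--     # the first header, then repeatedly locate the next header to cut out one
--     # header+body block, formatting each block as a whole.
--     secs = [s for s in report_content.split('\n\n') if s.strip()]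
--     n = len(secs)
--     i = 0
--     while i < n and not secs[i].startswith('#'):
--         i += 1
--     results = []
--     while i < n:
--         j = i + 1
--         while j < n and not secs[j].startswith('#'):
--             j += 1
--         title = secs[i].lstrip('#').strip()
--         if title:
--             results.append({'title': title,
--                             'description': '\n\n'.join(s.strip() for s in secs[i + 1:j]),
--                             'url': ''})
--         i = j
--     if not results:
--         results = [{'title': 'Search Results', 'description': report_content, 'url': ''}]
--     return results
-- ===== Notes on version B (the rewrite author's own statement) =====
-- stated objective: alternative
-- what changed: B pre-filters the non-blank sections, skips everything before the first header, then repeatedly scans for the next header boundary and formats each header+body block at once (slice + join), instead of A's single pass that mutates a current-section dict and flushes it at each header.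
import Mathlib
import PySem

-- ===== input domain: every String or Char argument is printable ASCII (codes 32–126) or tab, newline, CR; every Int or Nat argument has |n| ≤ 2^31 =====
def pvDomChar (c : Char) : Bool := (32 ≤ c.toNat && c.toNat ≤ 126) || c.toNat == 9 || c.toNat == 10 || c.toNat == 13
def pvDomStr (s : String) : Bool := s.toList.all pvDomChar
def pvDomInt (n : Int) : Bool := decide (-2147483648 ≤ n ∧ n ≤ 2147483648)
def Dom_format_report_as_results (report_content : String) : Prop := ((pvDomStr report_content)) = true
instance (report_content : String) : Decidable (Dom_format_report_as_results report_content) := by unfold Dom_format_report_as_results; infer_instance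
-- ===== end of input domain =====

-- B pre-filters the non-blank sections and then cuts the list into header+body blocks by
-- locating block boundaries (skip prefix, scan to next header, format the block at once)
-- instead of A's single pass of incremental dict mutation; same cost, different decomposition.


-- ===== PORT A =====
-- current_section is a dict with the fixed keys title/description/url (url always "");
-- its updates overwrite in place, so its item order is always [title, description, url]:
-- the port carries the (title, description) pair and materialises the item list on append.
def pvDictA (t d : String) : List (String × String) :=
  [("title", t), ("description", d), ("url", "")]

-- section.lstrip('#') ported by hand: drop the leading '#' characters (exact).
def pvLstripHash (s : String) : String := String.ofList (s.toList.dropWhile (· == '#'))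

def pvStepA (st : List (List (String × String)) × String × String) (sec : String) :
    List (List (String × String)) × String × String :=
  if PySem.Str.strip sec ≠ "" then
    if PySem.Str.startswith sec "#" then
      ((if st.2.1 ≠ "" then st.1 ++ [pvDictA st.2.1 st.2.2] else st.1),
       PySem.Str.strip (pvLstripHash sec), "")
    else
      (st.1, st.2.1,
       (if st.2.2 ≠ "" then st.2.2 ++ "\n\n" else st.2.2) ++ PySem.Str.strip sec)
  else st

def format_report_as_results (report_content : String) : List (List (String × String)) :=
  -- the separator "\n\n" is a nonempty literal, so split? never returns none
  let sections := (PySem.Str.split? report_content "\n\n").getD []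
  let st := sections.foldl pvStepA ([], "", "")
  let results := if st.2.1 ≠ "" then st.1 ++ [pvDictA st.2.1 st.2.2] else st.1
  if results = [] then
    [[("title", "Search Results"), ("description", report_content), ("url", "")]]
  else results

-- ===== PORT B =====
-- not secs[k].startswith('#'): the boundary test of B's scanning loops
def pvNotHeader (s : String) : Bool := !PySem.Str.startswith s "#"

-- B's outer while loop: the remaining list always starts at a header; the inner j-loop
-- delimiting the body is the takeWhile, moving i to the next header is the dropWhile;
-- each block is formatted as a whole and appended.
def pvBlocks : List String → List (List (String × String))
  | [] => []
  | hd :: tl =>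
    (if PySem.Str.strip (pvLstripHash hd) ≠ "" then
      [[("title", PySem.Str.strip (pvLstripHash hd)),
        ("description", PySem.Str.join "\n\n" ((tl.takeWhile pvNotHeader).map PySem.Str.strip)),
        ("url", "")]]
     else []) ++ pvBlocks (tl.dropWhile pvNotHeader)
termination_by l => l.length
decreasing_by
  have := List.length_dropWhile_le (p := pvNotHeader) (l := tl)
  simp only [List.length_cons]
  omega

-- B's leading skip loop, then the block-by-block outer loop
def pvChunksB (secs : List String) : List (List (String × String)) :=
  pvBlocks (secs.dropWhile pvNotHeader)

def format_report_as_results_alt (report_content : String) : List (List (String × String)) :=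
  let secs := ((PySem.Str.split? report_content "\n\n").getD []).filter
    (fun s => PySem.Str.strip s != "")
  let results := pvChunksB secs
  if results = [] then
    [[("title", "Search Results"), ("description", report_content), ("url", "")]]
  else results

-- ===== PRECONDITION & SPEC =====
def Spec_format_report_as_results (report_content : String) (out : List (List (String × String))) : Prop := out = format_report_as_results_alt report_content
instance (report_content : String) (out : List (List (String × String))) : Decidable (Spec_format_report_as_results report_content out) := by unfold Spec_format_report_as_results; infer_instance

-- ===== CLAIM (what is proved, stated in full; the proofs are below) =====
def Claim_equal_format_report_as_results : Prop := ∀ (report_content : String), Dom_format_report_as_results report_content → Spec_format_report_as_results report_content (format_report_as_results report_content)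

-- ===== LEMMAS AND PROOFS =====

-- Intermediate model shared by both directions of the proof: group the sections into
-- (title, paragraph list) groups; A's fold and B's block scan both reduce to it.
def pvAppendLast (gs : List (String × List String)) (s : String) : List (String × List String) :=
  match gs with
  | [] => []
  | [g] => [(g.1, g.2 ++ [s])]
  | g :: g' :: rest => g :: pvAppendLast (g' :: rest) s

def pvStepB (gs : List (String × List String)) (sec : String) : List (String × List String) :=
  if PySem.Str.strip sec = "" then gs
  else if PySem.Str.startswith sec "#" then
    gs ++ [(PySem.Str.strip (pvLstripHash sec), [])]
  else pvAppendLast gs (PySem.Str.strip sec)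

def pvFormatGroup (g : String × List String) : Option (List (String × String)) :=
  if g.1 ≠ "" then
    some [("title", g.1), ("description", PySem.Str.join "\n\n" g.2), ("url", "")]
  else none

-- the tail of A's loop and A's post-loop step: flush the pending section into results
def pvFinishA (st : List (List (String × String)) × String × String) :
    List (List (String × String)) :=
  if st.2.1 ≠ "" then st.1 ++ [pvDictA st.2.1 st.2.2] else st.1

lemma pv_join_singleton (s : String) : PySem.Str.join "\n\n" [s] = s := by
  apply String.toList_inj.mp
  simp [PySem.Str.toList_join, PySem.Chars.join, List.intercalate]

lemma pv_chars_join_snoc (sep : List Char) (p q : List Char) (ps : List (List Char)) :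
    PySem.Chars.join sep ((p :: ps) ++ [q]) = PySem.Chars.join sep (p :: ps) ++ sep ++ q := by
  induction ps generalizing p with
  | nil => simp [PySem.Chars.join, List.intercalate]
  | cons r rs ih =>
    simp only [List.cons_append] at ih ⊢
    rw [PySem.Chars.join_cons_cons, ih r, PySem.Chars.join_cons_cons]
    simp [List.append_assoc]

lemma pv_join_snoc (ps : List String) (s : String) (h : ps ≠ []) :
    PySem.Str.join "\n\n" (ps ++ [s]) = PySem.Str.join "\n\n" ps ++ "\n\n" ++ s := by
  apply String.toList_inj.mp
  obtain ⟨p, ps', rfl⟩ := List.exists_cons_of_ne_nil h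
  simp only [PySem.Str.toList_join, String.toList_append, List.map_append, List.map_cons,
    List.map_nil]
  exact pv_chars_join_snoc _ _ _ _

lemma pv_append_ne_empty (d s : String) : d ++ "\n\n" ++ s ≠ "" := by
  intro h
  have := congrArg String.toList h
  simp at this

lemma pv_appendLast_snoc (init : List (String × List String)) (t : String)
    (ps : List String) (s : String) :
    pvAppendLast (init ++ [(t, ps)]) s = init ++ [(t, ps ++ [s])] := by
  induction init with
  | nil => rfl
  | cons g gs ih =>
    cases gs with
    | nil => simp [pvAppendLast]
    | cons g' gs' =>
      simp only [List.cons_append, pvAppendLast] at ih ⊢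
      exact congrArg _ ih

lemma pv_finalize_snoc (init : List (String × List String)) (t : String) (ps : List String) :
    (init ++ [(t, ps)]).filterMap pvFormatGroup =
      init.filterMap pvFormatGroup ++
        (if t ≠ "" then [pvDictA t (PySem.Str.join "\n\n" ps)] else []) := by
  rw [List.filterMap_append]
  by_cases h : t = "" <;> simp [pvFormatGroup, pvDictA, h]

lemma pv_key (secs : List String) (res : List (List (String × String))) (t d : String)
    (init : List (String × List String)) (ps : List String)
    (hres : res = init.filterMap pvFormatGroup)
    (hd : d = PySem.Str.join "\n\n" ps)
    (h0 : ps = [] → d = "") (h1 : ps ≠ [] → d ≠ "") :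
    pvFinishA (secs.foldl pvStepA (res, t, d))
    = (secs.foldl pvStepB (init ++ [(t, ps)])).filterMap pvFormatGroup := by
  induction secs generalizing res t d init ps with
  | nil =>
    simp only [List.foldl_nil, pv_finalize_snoc, pvFinishA, hres, hd]
    split_ifs <;> simp
  | cons sec rest ih =>
    simp only [List.foldl_cons]
    by_cases hs : PySem.Str.strip sec = ""
    · rw [show pvStepA (res, t, d) sec = (res, t, d) by simp [pvStepA, hs],
          show pvStepB (init ++ [(t, ps)]) sec = init ++ [(t, ps)] by simp [pvStepB, hs]]
      exact ih res t d init ps hres hd h0 h1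
    · by_cases hh : PySem.Chars.startswith sec.toList ['#'] = true
      · rw [show pvStepA (res, t, d) sec =
              ((if t ≠ "" then res ++ [pvDictA t d] else res),
               PySem.Str.strip (pvLstripHash sec), "") by simp [pvStepA, hs, hh],
            show pvStepB (init ++ [(t, ps)]) sec =
              (init ++ [(t, ps)]) ++ [(PySem.Str.strip (pvLstripHash sec), [])] by
              simp [pvStepB, hs, hh]]
        refine ih _ _ _ (init ++ [(t, ps)]) []
          ?_ rfl (fun _ => rfl) (fun h => absurd rfl h)
        rw [pv_finalize_snoc, hres, hd]
        split_ifs <;> simp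
      · rw [show pvStepA (res, t, d) sec =
              (res, t, (if d ≠ "" then d ++ "\n\n" else d) ++ PySem.Str.strip sec) by
              simp [pvStepA, hs, hh],
            show pvStepB (init ++ [(t, ps)]) sec =
              pvAppendLast (init ++ [(t, ps)]) (PySem.Str.strip sec) by simp [pvStepB, hs, hh],
            pv_appendLast_snoc]
        cases ps with
        | nil =>
          have hd0 : d = "" := h0 rfl
          refine ih _ _ _ init [PySem.Str.strip sec]
            hres ?_ (by simp) (fun _ => ?_)
          · rw [pv_join_singleton, hd0]
            simp [String.empty_append]
          · rw [hd0]
            simpa [String.empty_append] using hs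
        | cons p ps' =>
          have hd1 : d ≠ "" := h1 (by simp)
          refine ih _ _ _ init ((p :: ps') ++ [PySem.Str.strip sec]) hres ?_ (by simp)
            (fun _ => ?_)
          · rw [pv_join_snoc _ _ (by simp), ← hd, if_pos hd1]
          · rw [if_pos hd1]
            exact pv_append_ne_empty _ _

-- skipping blank sections inside the fold equals pre-filtering them away
lemma pv_foldl_filter_blanks (secs : List String) (gs : List (String × List String)) :
    secs.foldl pvStepB gs
      = (secs.filter (fun s => PySem.Str.strip s != "")).foldl pvStepB gs := by
  induction secs generalizing gs with
  | nil => rfl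
  | cons sec rest ih =>
    by_cases hs : PySem.Str.strip sec = ""
    · rw [List.foldl_cons, show pvStepB gs sec = gs by simp [pvStepB, hs]]
      simpa [List.filter_cons, hs] using ih gs
    · simpa [List.filter_cons, hs] using ih (pvStepB gs sec)

-- the bridge: the group fold, finalized, is exactly B's block scan of the rest of the list
lemma pv_groups_chunks (secs : List String) (hnb : ∀ s ∈ secs, PySem.Str.strip s ≠ "")
    (init : List (String × List String)) (t : String) (ps : List String) :
    ((secs.foldl pvStepB (init ++ [(t, ps)])).filterMap pvFormatGroup)
      = init.filterMap pvFormatGroup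
        ++ (pvFormatGroup (t, ps ++ (secs.takeWhile pvNotHeader).map PySem.Str.strip)).toList
        ++ pvBlocks (secs.dropWhile pvNotHeader) := by
  induction secs generalizing init t ps with
  | nil =>
    rw [List.foldl_nil, pv_finalize_snoc]
    by_cases h : t = "" <;> simp [pvFormatGroup, pvDictA, pvBlocks, h]
  | cons sec rest ih =>
    have hs : PySem.Str.strip sec ≠ "" := hnb sec (by simp)
    have hrest : ∀ s ∈ rest, PySem.Str.strip s ≠ "" := fun s hm => hnb s (by simp [hm])
    rw [List.foldl_cons]
    by_cases hh : PySem.Chars.startswith sec.toList ['#'] = true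
    · -- header: closes the current group, opens a fresh one; the block scan starts here
      rw [show pvStepB (init ++ [(t, ps)]) sec
            = (init ++ [(t, ps)]) ++ [(PySem.Str.strip (pvLstripHash sec), [])] by
          simp [pvStepB, hs, hh],
        ih hrest]
      have hnh : pvNotHeader sec = false := by
        simp [pvNotHeader, PySem.Str.startswith, hh]
      rw [pv_finalize_snoc]
      simp only [List.takeWhile_cons, List.dropWhile_cons, hnh, Bool.false_eq_true,
        if_false, pvBlocks]
      by_cases ht : PySem.Str.strip (pvLstripHash sec) = "" <;>
        by_cases ht' : t = "" <;>
          simp [pvFormatGroup, pvDictA, ht, ht', List.append_assoc]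
    · -- body paragraph: extends the current group; it extends the current block's body
      rw [show pvStepB (init ++ [(t, ps)]) sec
            = pvAppendLast (init ++ [(t, ps)]) (PySem.Str.strip sec) by
          simp [pvStepB, hs, hh],
        pv_appendLast_snoc, ih hrest]
      have hnh : pvNotHeader sec = true := by
        simp [pvNotHeader, PySem.Str.startswith, hh]
      simp [hnh, List.append_assoc]

-- ===== VERDICT (by name: the statement is the Claim_ definition above) =====
theorem format_report_as_results_spec : Claim_equal_format_report_as_results := by
  intro report_content _
  unfold Spec_format_report_as_results
  have h := pv_key ((PySem.Str.split? report_content "\n\n").getD []) [] "" ""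
    [] [] rfl rfl (fun _ => rfl) (fun h => absurd rfl h)
  simp only [pvFinishA, List.nil_append] at h
  rw [pv_foldl_filter_blanks] at h
  have h2 := pv_groups_chunks
    ((((PySem.Str.split? report_content "\n\n").getD []).filter
        (fun s => PySem.Str.strip s != "")))
    (fun s hm => by simpa using (List.mem_filter.mp hm).2) [] "" []
  simp only [List.nil_append, List.filterMap_nil] at h2
  rw [h2] at h
  simp only [pvFormatGroup, ne_eq, not_true_eq_false, if_false, Option.toList_none,
    List.nil_append] at h
  simp only [format_report_as_results, format_report_as_results_alt, pvChunksB]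
  rw [h]
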